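-- pv_equiv track=rewrite | github.com/MaiAnhBao/EulerPython | Euler.py | SecondCondition
-- ===== SOURCE A (Python) =====
-- import itertools
--
-- def SecondCondition(s):
--     for i in range(1,len(s)):
--         for r in set(itertools.combinations(s,i)):
--             p = s - set(r)
--             for j in range(1,i):
--                 for q in set(itertools.combinations(p,j)):
--                     if sum(q) > sum(r):
--                         return False
--     return True
-- ===== SOURCE B (Python) =====
-- def SecondCondition(s):
--     a = sorted(s)
--     n = len(a)
--     for k in range(1, (n - 1) // 2 + 1):
--         if sum(a[:k + 1]) < sum(a[n - k:]):
--             return False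
--     return True
-- ===== Notes on version B (the rewrite author's own statement) =====
-- stated objective: faster
-- what changed: Instead of enumerating every pair of disjoint subsets (r, q) with |q| < |r| via itertools.combinations, B sorts the set once and checks only the extremal pairs: sum of the k+1 smallest elements must be at least the sum of the k largest, for each k up to (n-1)//2.
import Mathlib
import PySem

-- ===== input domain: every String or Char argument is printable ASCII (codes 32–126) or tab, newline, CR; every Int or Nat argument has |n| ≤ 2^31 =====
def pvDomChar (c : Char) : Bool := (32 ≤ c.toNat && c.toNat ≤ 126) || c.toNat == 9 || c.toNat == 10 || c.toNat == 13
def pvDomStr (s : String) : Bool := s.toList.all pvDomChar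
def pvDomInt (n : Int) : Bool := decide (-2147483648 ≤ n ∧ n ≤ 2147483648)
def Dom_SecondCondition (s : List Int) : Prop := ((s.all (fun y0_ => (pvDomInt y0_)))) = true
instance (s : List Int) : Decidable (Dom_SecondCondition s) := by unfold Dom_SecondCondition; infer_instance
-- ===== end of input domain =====

-- B replaces A's scan over all pairs of disjoint subsets by the sorted extremal check:
-- sum of the (k+1) smallest elements vs sum of the k largest, for each k.

-- ===== PORT A =====
-- for i in range(1,len(s)): for r in set(combinations(s,i)): p = s - set(r);
--   for j in range(1,i): for q in set(combinations(p,j)): if sum(q) > sum(r): return False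
-- the early 'return False' = negation of 'no (i,r,j,q) fires' (existence is set-order independent)
def SecondCondition (s : List Int) : Bool :=
  !((PySem.List.pyRange 1 (s.length : Int) 1).any (fun i =>
    (PySem.Set.ofList (PySem.List.combinations s i.toNat)).any (fun r =>
      (PySem.List.pyRange 1 i 1).any (fun j =>
        (PySem.Set.ofList (PySem.List.combinations (PySem.Set.diff s r) j.toNat)).any (fun q =>
          decide (r.sum < q.sum))))))

-- ===== PORT B =====
-- a = sorted(s); for k in range(1,(n-1)//2+1): if sum(a[:k+1]) < sum(a[n-k:]): return False
def SecondCondition_alt (s : List Int) : Bool :=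
  let a := PySem.List.sorted s (fun x => x) false
  let n : Int := (a.length : Int)
  !((PySem.List.pyRange 1 (PySem.Int.floordiv (n - 1) 2 + 1) 1).any (fun k =>
    decide ((PySem.List.slice a none (some (k + 1))).sum <
            (PySem.List.slice a (some (n - k)) none).sum)))

-- ===== PRECONDITION & SPEC =====
-- The Python parameter is a set[int]; by the type convention the list holds its DISTINCT
-- elements, so Pre_ excludes lists with duplicates (they do not represent any set input).
def Pre_SecondCondition (s : List Int) : Prop := s.Nodup
instance (s : List Int) : Decidable (Pre_SecondCondition s) := by unfold Pre_SecondCondition; infer_instance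
def pvWitness_SecondCondition : List Int := [2, 3, 4]
def Spec_SecondCondition (s : List Int) (out : Bool) : Prop := out = SecondCondition_alt s
instance (s : List Int) (out : Bool) : Decidable (Spec_SecondCondition s out) := by unfold Spec_SecondCondition; infer_instance

-- ===== CLAIM =====
def Claim_equal_SecondCondition : Prop := ∀ (s : List Int), Dom_SecondCondition s → Pre_SecondCondition s → Spec_SecondCondition s (SecondCondition s)

-- ===== LEMMAS AND PROOFS =====

theorem pv_sum_take_le (a : List Int) (ha : a.Pairwise (· ≤ ·)) :
    ∀ t : List Int, t.Sublist a → (a.take t.length).sum ≤ t.sum := by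
  induction a with
  | nil => intro t ht; simp [List.sublist_nil.mp ht]
  | cons x tl ih =>
    intro t ht
    have hx : ∀ y ∈ tl, x ≤ y := (List.pairwise_cons.mp ha).1
    have hptl : tl.Pairwise (· ≤ ·) := (List.pairwise_cons.mp ha).2
    rcases List.sublist_cons_iff.mp ht with h | ⟨t', rfl, ht'⟩
    · cases t with
      | nil => simp
      | cons y t'' =>
        have hlen : t''.length < tl.length := by
          have := h.length_le; simp only [List.length_cons] at this; omega
        have ihh := ih hptl _ h
        have hsplit : tl.take (y :: t'').length = tl.take t''.length ++ [tl[t''.length]] := by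
          rw [List.length_cons, List.take_add_one, List.getElem?_eq_getElem hlen]
          rfl
        have hxel : x ≤ tl[t''.length] := hx _ (List.getElem_mem hlen)
        rw [hsplit, List.sum_append] at ihh
        simp only [List.length_cons, List.take_succ_cons, List.sum_cons, List.sum_nil] at *
        omega
    · simp only [List.length_cons, List.take_succ_cons, List.sum_cons]
      have := ih hptl t' ht'; omega

theorem pv_sum_le_drop (a : List Int) (ha : a.Pairwise (· ≤ ·)) :
    ∀ t : List Int, t.Sublist a → t.sum ≤ (a.drop (a.length - t.length)).sum := by
  intro t ht
  have hb : ((a.map (fun x => -x)).reverse).Pairwise (· ≤ ·) := by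
    rw [List.pairwise_reverse, List.pairwise_map]
    exact ha.imp (fun h => neg_le_neg h)
  have hu : ((t.map (fun x => -x)).reverse).Sublist ((a.map (fun x => -x)).reverse) :=
    (ht.map _).reverse
  have key := pv_sum_take_le _ hb _ hu
  have hlen : ((t.map (fun x => -x)).reverse).length = t.length := by simp
  rw [hlen] at key
  have htake : ((a.map (fun x => -x)).reverse).take t.length
      = ((a.map (fun x => -x)).drop (a.length - t.length)).reverse := by
    rw [List.take_reverse]
    simp
  rw [htake] at key
  rw [List.sum_reverse, List.sum_reverse, ← List.map_drop, ← List.sum_neg, ← List.sum_neg] at key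
  omega

theorem pv_sum_take_mono (a : List Int) (h0 : ∀ x ∈ a, 0 ≤ x) {m m' : Nat} (h : m ≤ m') :
    (a.take m).sum ≤ (a.take m').sum := by
  have hsplit : (a.take m').sum = (a.take m).sum + ((a.take m').drop m).sum := by
    conv_lhs => rw [← List.take_append_drop m (a.take m')]
    rw [List.sum_append, List.take_take, Nat.min_eq_left h]
  rw [hsplit]
  have : 0 ≤ ((a.take m').drop m).sum := by
    apply List.sum_nonneg
    intro x hx
    exact h0 x (List.mem_of_mem_take (List.mem_of_mem_drop hx))
  omega


theorem pv_A_iff (s : List Int) :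
    SecondCondition s = true ↔
      ∀ r q : List Int, r.Sublist s → q.Sublist (PySem.Set.diff s r) →
        1 ≤ r.length → r.length < s.length → 1 ≤ q.length → q.length < r.length →
        q.sum ≤ r.sum := by
  unfold SecondCondition
  simp only [Bool.not_eq_true', Bool.not_eq_true, List.any_eq_false, decide_eq_false_iff_not,
    not_lt, PySem.Set.mem_ofList, PySem.List.mem_combinations_iff, PySem.List.mem_pyRange_one]
  constructor
  · intro H r q hr hq h1 h2 h3 h4
    exact H (r.length : Int) (by omega) r ⟨hr, by omega⟩ (q.length : Int) (by omega) q
      ⟨hq, by omega⟩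
  · intro H i hi r hr j hj q hq
    exact H r q hr.1 hq.1 (by omega) (by omega) (by omega) (by omega)


theorem pv_B_iff (s : List Int) :
    SecondCondition_alt s = true ↔
      ∀ k : Nat, 1 ≤ k → 2 * k + 1 ≤ s.length →
        ((PySem.List.sorted s (fun x => x) false).drop (s.length - k)).sum ≤
        ((PySem.List.sorted s (fun x => x) false).take (k + 1)).sum := by
  unfold SecondCondition_alt
  simp only [Bool.not_eq_true', Bool.not_eq_true, List.any_eq_false, decide_eq_false_iff_not,
    not_lt, PySem.List.mem_pyRange_one, PySem.List.length_sorted]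
  have hfd : ∀ k : Int, k ≤ PySem.Int.floordiv ((s.length : Int) - 1) 2 ↔ k * 2 ≤ (s.length : Int) - 1 :=
    fun k => PySem.Int.le_floordiv_iff_mul_le (by omega)
  constructor
  · intro H k hk1 hk2
    have h := H (k : Int) (by rw [Int.lt_add_one_iff, hfd]; omega)
    rw [PySem.List.slice_to _ (by omega), PySem.List.slice_from _ (by omega)] at h
    have e1 : ((k : Int) + 1).toNat = k + 1 := by omega
    have e2 : (((s.length : Int)) - (k : Int)).toNat = s.length - k := by omega
    rw [e1, e2] at h
    exact h
  · intro H k hk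
    obtain ⟨hk1, hk2⟩ := hk
    rw [Int.lt_add_one_iff, hfd] at hk2
    rw [PySem.List.slice_to _ (by omega), PySem.List.slice_from _ (by omega)]
    have e1 : ((k : Int) + 1).toNat = k.toNat + 1 := by omega
    have e2 : (((s.length : Int)) - k).toNat = s.length - k.toNat := by omega
    rw [e1, e2]
    exact H k.toNat (by omega) (by omega)

theorem pv_nonneg (s : List Int)
    (hB : ∀ k : Nat, 1 ≤ k → 2 * k + 1 ≤ s.length →
      ((PySem.List.sorted s (fun x => x) false).drop (s.length - k)).sum ≤
      ((PySem.List.sorted s (fun x => x) false).take (k + 1)).sum)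
    (h3 : 3 ≤ s.length) :
    ∀ x ∈ PySem.List.sorted s (fun x => x) false, 0 ≤ x := by
  have hlen : (PySem.List.sorted s (fun x : Int => x) false).length = s.length :=
    PySem.List.length_sorted s (fun x => x) false
  have ha : (PySem.List.sorted s (fun x : Int => x) false).Pairwise (· ≤ ·) :=
    PySem.List.sorted_pairwise s (fun x => x)
  have h1 := hB 1 (le_refl 1) (by omega)
  revert hlen ha h1
  cases hAs : PySem.List.sorted s (fun x : Int => x) false with
  | nil =>
    intro hlen
    exfalso; simp at hlen; omega
  | cons a0 t =>
    cases t with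
    | nil =>
      intro hlen
      exfalso; simp at hlen; omega
    | cons a1 rest =>
      intro hlen ha h1
      have htake : (a0 :: a1 :: rest).take 2 = [a0, a1] := by simp
      have hne2 : a1 :: rest ≠ [] := by simp
      have hdrop : (a0 :: a1 :: rest).drop (s.length - 1) = [(a1 :: rest).getLast hne2] := by
        have : (a0 :: a1 :: rest).drop (s.length - 1) = (a1 :: rest).drop (s.length - 2) := by
          have : s.length - 1 = (s.length - 2) + 1 := by omega
          rw [this, List.drop_succ_cons]
        rw [this]
        have h2 : s.length - 2 = (a1 :: rest).length - 1 := by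
          simp only [List.length_cons] at hlen ⊢; omega
        rw [h2, List.drop_length_sub_one hne2]
      rw [htake, hdrop] at h1
      simp only [List.sum_cons, List.sum_nil] at h1
      have hmem := List.getLast_mem hne2
      have ha1le : a1 ≤ (a1 :: rest).getLast hne2 := by
        rcases List.mem_cons.mp hmem with h | h
        · omega
        · exact List.rel_of_pairwise_cons (List.pairwise_cons.mp ha).2 h
      have ha0 : 0 ≤ a0 := by omega
      intro x hx
      rcases List.mem_cons.mp hx with h | h
      · omega
      · have := List.rel_of_pairwise_cons ha h
        omega

theorem pv_sum_take_le_subperm (a t : List Int) (ha : a.Pairwise (· ≤ ·)) (ht : List.Subperm t a) :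
    (a.take t.length).sum ≤ t.sum := by
  obtain ⟨u, hu, hus⟩ := ht
  calc (a.take t.length).sum = (a.take u.length).sum := by rw [hu.length_eq]
    _ ≤ u.sum := pv_sum_take_le a ha u hus
    _ = t.sum := hu.sum_eq

theorem pv_sum_le_drop_subperm (a t : List Int) (ha : a.Pairwise (· ≤ ·)) (ht : List.Subperm t a) :
    t.sum ≤ (a.drop (a.length - t.length)).sum := by
  obtain ⟨u, hu, hus⟩ := ht
  calc t.sum = u.sum := hu.sum_eq.symm
    _ ≤ (a.drop (a.length - u.length)).sum := pv_sum_le_drop a ha u hus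
    _ = (a.drop (a.length - t.length)).sum := by rw [hu.length_eq]

theorem pv_main (s : List Int) (hnd : s.Nodup) :
    SecondCondition s = SecondCondition_alt s := by
  have key : SecondCondition s = true ↔ SecondCondition_alt s = true := by
    rw [pv_A_iff, pv_B_iff]
    have hperm : (PySem.List.sorted s (fun x : Int => x) false).Perm s :=
      PySem.List.sorted_perm s (fun x => x) false
    have ha : (PySem.List.sorted s (fun x : Int => x) false).Pairwise (· ≤ ·) :=
      PySem.List.sorted_pairwise s (fun x => x)
    set a := PySem.List.sorted s (fun x : Int => x) false with hadef
    have hlen : a.length = s.length := hperm.length_eq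
    have hna : a.Nodup := hperm.nodup_iff.mpr hnd
    constructor
    · -- every (r,q) check passes → every k check passes
      intro H k hk1 hk2
      obtain ⟨r, hrp, hrs⟩ := ((List.take_sublist (k+1) a).subperm).trans hperm.subperm
      have hdisj : ∀ x ∈ a.drop (s.length - k), x ∉ a.take (k+1) := by
        intro x hx
        have hx' : x ∈ a.drop (k+1) := by
          have : a.drop (s.length - k) = (a.drop (k+1)).drop (s.length - k - (k+1)) := by
            rw [List.drop_drop]
            congr 1
            omega
          rw [this] at hx
          exact List.mem_of_mem_drop hx
        have hsplit : (a.take (k+1) ++ a.drop (k+1)).Nodup := by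
          rw [List.take_append_drop]; exact hna
        exact fun hmem => List.disjoint_of_nodup_append hsplit hmem hx'
      have hqsub : a.drop (s.length - k) ⊆ PySem.Set.diff s r := by
        intro x hx
        refine (PySem.Set.mem_diff s r x).mpr ⟨hperm.subset (List.mem_of_mem_drop hx), ?_⟩
        intro hxr
        exact hdisj x hx (hrp.subset hxr)
      obtain ⟨q, hqp, hqs⟩ :=
        List.subperm_of_subset (hna.sublist (List.drop_sublist _ _)) hqsub
      have hrlen : r.length = k + 1 := by
        rw [hrp.length_eq, List.length_take]
        omega
      have hqlen : q.length = k := by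
        rw [hqp.length_eq, List.length_drop]
        omega
      have := H r q hrs hqs (by omega) (by omega) (by omega) (by omega)
      calc (a.drop (s.length - k)).sum = q.sum := hqp.sum_eq.symm
        _ ≤ r.sum := this
        _ = (a.take (k+1)).sum := hrp.sum_eq
    · -- every k check passes → every (r,q) check passes
      intro H r q hrs hqs h1 h2 h3 h4
      have hrnd : r.Nodup := hnd.sublist hrs
      have hqnd : q.Nodup := (PySem.Set.nodup_diff s r hnd).sublist hqs
      have hqmem : ∀ x ∈ q, x ∈ s ∧ x ∉ r := by
        intro x hx
        exact (PySem.Set.mem_diff s r x).mp (hqs.subset hx)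
      have hij : q.length + r.length ≤ s.length := by
        have hnodup : (q ++ r).Nodup := by
          rw [List.nodup_append]
          refine ⟨hqnd, hrnd, ?_⟩
          intro x hx y hy hxy
          exact (hqmem x hx).2 (hxy ▸ hy)
        have hsub : (q ++ r) ⊆ s := by
          intro x hx
          rcases List.mem_append.mp hx with h | h
          · exact (hqmem x h).1
          · exact hrs.subset h
        have := (List.subperm_of_subset hnodup hsub).length_le
        simpa using this
      have h3n : 3 ≤ s.length := by omega
      have hpos : ∀ x ∈ a, 0 ≤ x := pv_nonneg s H h3n
      have hqa : List.Subperm q a := by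
        refine List.Subperm.trans (List.subperm_of_subset hqnd fun x hx => (hqmem x hx).1) ?_
        exact hperm.symm.subperm
      have hra : List.Subperm r a := hrs.subperm.trans hperm.symm.subperm
      have c1 : q.sum ≤ (a.drop (a.length - q.length)).sum := pv_sum_le_drop_subperm a q ha hqa
      have c2 : (a.drop (s.length - q.length)).sum ≤ (a.take (q.length + 1)).sum :=
        H q.length (by omega) (by omega)
      have c3 : (a.take (q.length + 1)).sum ≤ (a.take r.length).sum :=
        pv_sum_take_mono a hpos (by omega)
      have c4 : (a.take r.length).sum ≤ r.sum := pv_sum_take_le_subperm a r ha hra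
      rw [hlen] at c1
      omega
  cases hA : SecondCondition s <;> cases hB : SecondCondition_alt s <;> simp_all

-- ===== VERDICT =====
theorem SecondCondition_spec : Claim_equal_SecondCondition := by
  intro s _ hpre
  unfold Spec_SecondCondition
  exact pv_main s hpre
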